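-- pv_equiv track=rewrite | github.com/ChartinoLabs/Muninn | src/muninn/parsers/ios/_acl_common.py | _consume_parenthesized_status
-- ===== SOURCE A (Python) =====
-- def _consume_parenthesized_status(tokens: list[str], index: int) -> tuple[str, int]:
--     """Consume one or more tokens that form a parenthesized status string."""
--     token = tokens[index]
--     if token.endswith(")"):
--         return token.strip("()"), index + 1
--
--     parts = [token.lstrip("(")]
--     next_index = index + 1
--     while next_index < len(tokens):
--         part = tokens[next_index]
--         parts.append(part.rstrip(")"))
--         next_index += 1
--         if part.endswith(")"):
--             break
--     return " ".join(parts), next_index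
-- ===== SOURCE B (Python) =====
-- def _consume_parenthesized_status(tokens: list[str], index: int) -> tuple[str, int]:
--     """Consume one or more tokens that form a parenthesized status string."""
--     token = tokens[index]
--     if token.endswith(")"):
--         return token.strip("()"), index + 1
--
--     # Phase 1: find `end`, the index of the first token at or after index+1
--     # ending with ')' (len(tokens) if none); `stop` is the exclusive boundary
--     # of consumed tokens and also the next index to return.
--     end = index + 1
--     while end < len(tokens) and not tokens[end].endswith(")"):
--         end += 1
--     stop = end + 1 if end < len(tokens) else end
--     # Phase 2: transform and join in one mapping pass over the found span.
--     parts = [token.lstrip("(")] + [tokens[j].rstrip(")") for j in range(index + 1, stop)]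
--     return " ".join(parts), stop
-- ===== Notes on version B (the rewrite author's own statement) =====
-- stated objective: alternative
-- what changed: B splits the work into two phases - a boundary scan that only finds the index of the first closing token, then a separate mapping pass that strips and joins the consumed slice - instead of A's single loop that interleaves appending stripped parts with the break test.
import Mathlib
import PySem

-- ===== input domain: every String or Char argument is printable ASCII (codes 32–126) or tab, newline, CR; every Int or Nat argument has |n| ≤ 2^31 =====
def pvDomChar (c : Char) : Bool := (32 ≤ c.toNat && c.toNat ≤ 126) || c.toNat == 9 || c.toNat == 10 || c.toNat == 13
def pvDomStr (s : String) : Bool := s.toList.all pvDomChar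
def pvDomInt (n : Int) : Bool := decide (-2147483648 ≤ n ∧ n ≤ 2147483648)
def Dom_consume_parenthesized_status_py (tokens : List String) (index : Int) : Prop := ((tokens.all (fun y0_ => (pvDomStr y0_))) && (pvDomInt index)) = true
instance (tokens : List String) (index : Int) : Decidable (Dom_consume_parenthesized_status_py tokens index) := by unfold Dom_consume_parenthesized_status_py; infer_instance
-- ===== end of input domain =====

-- B separates boundary-finding (scan for the first ')'-terminated token) from a transform-and-join
-- mapping pass, instead of A's single interleaved accumulate-and-break loop; same cost, equal results.

-- token.lstrip("(") — exact hand port: drop every leading '(' (single-char strip set)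
def pvLstripParen (s : String) : String := String.ofList (s.toList.dropWhile (fun c => c == '('))
-- part.rstrip(")") — exact hand port: drop every trailing ')' (single-char strip set)
def pvRstripParen (s : String) : String := String.ofList (((s.toList.reverse).dropWhile (fun c => c == ')')).reverse)

-- ===== PORT A =====
-- A's while loop: appends part.rstrip(")") and breaks after incrementing when part ends with ')'
def pvPartsLoopA (tokens : List String) (parts : List String) (next_index : Int) : List String × Int :=
  if next_index < (tokens.length : Int) then
    let part := PySem.List.pyGetD tokens next_index ""   -- tokens[next_index]; in range whenever Python A reaches this line under Pre_
    let parts2 := parts ++ [pvRstripParen part]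
    if PySem.Str.endswith part ")" then (parts2, next_index + 1)
    else pvPartsLoopA tokens parts2 (next_index + 1)
  else (parts, next_index)
termination_by ((tokens.length : Int) - next_index).toNat
decreasing_by omega

def consume_parenthesized_status_py (tokens : List String) (index : Int) : String × Int :=
  match PySem.List.pyGet? tokens index with
  | none => ("", 0)   -- IndexError in Python; excluded by Pre_
  | some token =>
    if PySem.Str.endswith token ")" then (PySem.Str.stripChars token "()", index + 1)
    else
      let r := pvPartsLoopA tokens [pvLstripParen token] (index + 1)
      (PySem.Str.join " " r.1, r.2)

-- ===== PORT B =====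
-- B's phase 1: first index e ≥ start with tokens[e].endswith(')'), else len(tokens)
def pvFindEndB (tokens : List String) (e : Int) : Int :=
  if e < (tokens.length : Int) then
    if PySem.Str.endswith (PySem.List.pyGetD tokens e "") ")" then e
    else pvFindEndB tokens (e + 1)
  else e
termination_by ((tokens.length : Int) - e).toNat
decreasing_by omega

def consume_parenthesized_status_py_alt (tokens : List String) (index : Int) : String × Int :=
  match PySem.List.pyGet? tokens index with
  | none => ("", 0)   -- IndexError in Python; excluded by Pre_
  | some token =>
    if PySem.Str.endswith token ")" then (PySem.Str.stripChars token "()", index + 1)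
    else
      let e := pvFindEndB tokens (index + 1)
      let stop := if e < (tokens.length : Int) then e + 1 else e
      let parts := [pvLstripParen token] ++
        (PySem.List.pyRange (index + 1) stop 1).map
          (fun j => pvRstripParen (PySem.List.pyGetD tokens j ""))
      (PySem.Str.join " " parts, stop)

-- ===== PRECONDITION & SPEC =====
-- Pre_: exactly the inputs on which Python A returns (tokens[index] in range, Python negative-index rule);
-- outside it A raises IndexError.
def Pre_consume_parenthesized_status_py (tokens : List String) (index : Int) : Prop :=
  PySem.Raise.InRange tokens.length index
instance (tokens : List String) (index : Int) : Decidable (Pre_consume_parenthesized_status_py tokens index) := by unfold Pre_consume_parenthesized_status_py; infer_instance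

def pvWitness_consume_parenthesized_status_py : List String × Int := (["(Up", "and", "running)"], 0)

def Spec_consume_parenthesized_status_py (tokens : List String) (index : Int) (out : String × Int) : Prop := out = consume_parenthesized_status_py_alt tokens index
instance (tokens : List String) (index : Int) (out : String × Int) : Decidable (Spec_consume_parenthesized_status_py tokens index out) := by unfold Spec_consume_parenthesized_status_py; infer_instance

-- ===== CLAIM (what is proved, stated in full; the proofs are below) =====
def Claim_equal_consume_parenthesized_status_py : Prop := ∀ (tokens : List String) (index : Int), Dom_consume_parenthesized_status_py tokens index → Pre_consume_parenthesized_status_py tokens index → Spec_consume_parenthesized_status_py tokens index (consume_parenthesized_status_py tokens index)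

-- ===== LEMMAS AND PROOFS =====

-- B's stop boundary computed from a scan start
def pvStopB (tokens : List String) (start : Int) : Int :=
  if pvFindEndB tokens start < (tokens.length : Int) then pvFindEndB tokens start + 1
  else pvFindEndB tokens start

lemma le_pvFindEndB (tokens : List String) (e : Int) : e ≤ pvFindEndB tokens e := by
  unfold pvFindEndB
  split
  · split
    · exact le_refl _
    · have := le_pvFindEndB tokens (e + 1); omega
  · exact le_refl _
termination_by ((tokens.length : Int) - e).toNat
decreasing_by omega

-- A's loop result = B's phase split: the mapped range up to pvStopB, paired with pvStopB
lemma pvPartsLoopA_eq (tokens : List String) (parts : List String) (ni : Int) :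
    pvPartsLoopA tokens parts ni =
      (parts ++ (PySem.List.pyRange ni (pvStopB tokens ni) 1).map
          (fun j => pvRstripParen (PySem.List.pyGetD tokens j "")),
        pvStopB tokens ni) := by
  fun_induction pvPartsLoopA tokens parts ni with
  | case1 parts ni hlt part parts2 hends =>
      have hfind : pvFindEndB tokens ni = ni := by
        conv_lhs => rw [pvFindEndB]
        rw [if_pos hlt, if_pos hends]
      have hstop : pvStopB tokens ni = ni + 1 := by
        unfold pvStopB; rw [hfind]; simp [hlt]
      rw [hstop, PySem.List.pyRange_one_singleton]
      simp [parts2, part]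
  | case2 parts ni hlt part parts2 hends ih =>
      have hfind : pvFindEndB tokens ni = pvFindEndB tokens (ni + 1) := by
        conv_lhs => rw [pvFindEndB]
        rw [if_pos hlt, if_neg hends]
      have hstop : pvStopB tokens ni = pvStopB tokens (ni + 1) := by
        unfold pvStopB; rw [hfind]
      rw [ih, hstop]
      have hlt' : ni < pvStopB tokens (ni + 1) := by
        have h1 := le_pvFindEndB tokens (ni + 1)
        unfold pvStopB; split <;> omega
      rw [PySem.List.pyRange_one_cons hlt']
      simp [parts2, part]
  | case3 parts ni hge =>
      have hfind : pvFindEndB tokens ni = ni := by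
        unfold pvFindEndB; simp [hge]
      have hstop : pvStopB tokens ni = ni := by
        unfold pvStopB; rw [hfind]; simp [hge]
      rw [hstop, PySem.List.pyRange_one_eq_nil (le_refl ni)]
      simp

-- ===== VERDICT (by name: the statement is the Claim_ definition above) =====
theorem consume_parenthesized_status_py_spec : Claim_equal_consume_parenthesized_status_py := by
  intro tokens index _hdom hpre
  unfold Spec_consume_parenthesized_status_py
  unfold consume_parenthesized_status_py consume_parenthesized_status_py_alt
  obtain ⟨tok, htok⟩ : ∃ t, PySem.List.pyGet? tokens index = some t := by
    rcases h : PySem.List.pyGet? tokens index with _ | t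
    · exact absurd ((PySem.List.pyGet?_eq_none_iff tokens index).mp h) (fun hn => hn hpre)
    · exact ⟨t, rfl⟩
  rw [htok]
  dsimp only
  by_cases hends : PySem.Str.endswith tok ")" = true
  · rw [if_pos hends, if_pos hends]
  · rw [if_neg hends, if_neg hends, pvPartsLoopA_eq]
    simp [pvStopB]
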